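-- pv_equiv track=rewrite | github.com/SasCezar/GitHubClassificationDataset | src/processing/linking.py | order_clusters
-- ===== SOURCE A (Python) =====
-- from typing import Iterable, List, Tuple, Optional, Dict
--
-- def order_clusters(cluster: List) -> List[int]:
--     seen = {}
--     n = len(set(cluster))
--     res = []
--     for i in cluster:
--         if i not in seen:
--             seen[i] = n - (len(seen) + 1)
--         res.append(seen[i])
--
--     return res
-- ===== SOURCE B (Python) =====
-- def order_clusters(cluster):
--     n = len(set(cluster))
--     return [n - len(set(cluster[:cluster.index(i) + 1])) for i in cluster]
-- ===== Notes on version B (the rewrite author's own statement) =====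
-- stated objective: alternative
-- what changed: Replaces A's stateful single pass (a dict of assigned ids grown while emitting) with a stateless per-element closed form: each element's id is n minus the number of distinct values in the prefix ending at its first occurrence, computed independently with index() and set() per element; no id table is ever built.
import Mathlib
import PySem

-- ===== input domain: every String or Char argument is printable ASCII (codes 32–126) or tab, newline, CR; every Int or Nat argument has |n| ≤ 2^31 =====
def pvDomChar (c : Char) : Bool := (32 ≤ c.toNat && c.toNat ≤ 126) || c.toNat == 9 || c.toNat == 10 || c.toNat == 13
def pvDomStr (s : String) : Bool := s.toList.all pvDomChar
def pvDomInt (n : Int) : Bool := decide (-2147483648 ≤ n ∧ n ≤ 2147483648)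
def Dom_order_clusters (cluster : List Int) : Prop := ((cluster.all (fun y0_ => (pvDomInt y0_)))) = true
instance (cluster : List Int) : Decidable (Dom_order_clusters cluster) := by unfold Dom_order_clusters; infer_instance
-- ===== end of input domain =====

-- B replaces A's stateful single pass (growing a dict of ids) with a stateless per-element
-- closed form: id(i) = n - |set(prefix up to i's first occurrence)|; alternative algorithm, not faster.


-- ===== PORT A =====
-- one pass: `seen` grows as new elements appear; a fresh element gets id n - (len(seen)+1)
def order_clusters (cluster : List Int) : List Int :=
  let n : Int := (PySem.Set.ofList cluster).length
  (cluster.foldl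
    (fun (st : PySem.Dict Int Int × List Int) i =>
      let seen := if st.1.contains i then st.1 else st.1.insert i (n - ((st.1.size : Int) + 1))
      (seen, st.2 ++ [seen.getD i 0]))
    (PySem.Dict.empty, [])).2

-- ===== PORT B =====
-- per-element closed form; cluster.index(i) cannot raise since i is drawn from cluster,
-- so `(index? cluster i).getD 0` is exact there
def order_clusters_alt (cluster : List Int) : List Int :=
  let n : Int := (PySem.Set.ofList cluster).length
  cluster.map (fun i =>
    n - ((PySem.Set.ofList (PySem.List.slice cluster none
          (some (((PySem.List.index? cluster i).getD 0 : Int) + 1)))).length : Int))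

-- ===== PRECONDITION & SPEC =====
def Spec_order_clusters (cluster : List Int) (out : List Int) : Prop := out = order_clusters_alt cluster
instance (cluster : List Int) (out : List Int) : Decidable (Spec_order_clusters cluster out) := by unfold Spec_order_clusters; infer_instance

-- ===== CLAIM (what is proved, stated in full; the proofs are below) =====
def Claim_equal_order_clusters : Prop := ∀ (cluster : List Int), Dom_order_clusters cluster → Spec_order_clusters cluster (order_clusters cluster)

-- ===== LEMMAS AND PROOFS =====

-- a Set.add-fold only extends its accumulator
lemma prefix_foldl_add : ∀ (l : List Int) (s : PySem.Set Int), s <+: List.foldl PySem.Set.add s l := by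
  intro l
  induction l with
  | nil => intro s; simp
  | cons x xs ih =>
    intro s
    refine List.IsPrefix.trans ?_ (ih (PySem.Set.add s x))
    unfold PySem.Set.add
    split
    · exact List.prefix_refl s
    · exact List.prefix_append s [x]

-- the A-loop invariant: after consuming a prefix whose distinct elements are order.take k,
-- `seen` maps exactly those elements to n-1-rank, and the rest of the loop appends the remapped tail
lemma Aloop (order : List Int) (n : Int) :
    ∀ (rest : List Int) (seen : PySem.Dict Int Int) (res : List Int) (k : Nat),
      order.Nodup →
      (∀ i : Int, seen.get? i =
        if i ∈ order.take k then some (n - 1 - (order.idxOf i : Int)) else none) →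
      seen.size = k →
      List.foldl PySem.Set.add (order.take k) rest = order →
      (rest.foldl
        (fun (st : PySem.Dict Int Int × List Int) i =>
          let seen := if st.1.contains i then st.1 else st.1.insert i (n - ((st.1.size : Int) + 1))
          (seen, st.2 ++ [seen.getD i 0]))
        (seen, res)).2
      = res ++ rest.map (fun i => n - 1 - (order.idxOf i : Int)) := by
  intro rest
  induction rest with
  | nil => intro seen res k _ _ _ _; simp
  | cons i rest ih =>
    intro seen res k hnd hget hsize hfold
    simp only [List.foldl_cons] at hfold ⊢
    by_cases hmem : i ∈ order.take k
    · -- already seen: dict unchanged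
      have hci : seen.contains i = true := by
        rw [PySem.Dict.contains_eq_isSome_get?, hget i, if_pos hmem]; rfl
      have hadd : PySem.Set.add (order.take k) i = order.take k := by
        unfold PySem.Set.add
        simp [PySem.Set.contains, hmem]
      rw [hadd] at hfold
      have := ih seen (res ++ [seen.getD i 0]) k hnd hget hsize hfold
      simp only [hci, if_true] at this ⊢
      rw [this, PySem.Dict.getD_eq_get?_getD, hget i, if_pos hmem]
      simp
    · -- new element: it must be order[k]
      have hci : seen.contains i = false := by
        rw [PySem.Dict.contains_eq_isSome_get?, hget i, if_neg hmem]; rfl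
      have hadd : PySem.Set.add (order.take k) i = order.take k ++ [i] := by
        unfold PySem.Set.add
        simp [PySem.Set.contains, hmem]
      rw [hadd] at hfold
      have hpre := prefix_foldl_add rest (order.take k ++ [i])
      rw [hfold] at hpre
      have hlen := hpre.length_le
      simp only [List.length_append, List.length_take, List.length_cons, List.length_nil] at hlen
      have hk : k < order.length := by omega
      have htake : order.take (k + 1) = order.take k ++ [i] := by
        rw [List.prefix_iff_eq_take] at hpre
        simp only [List.length_append, List.length_take, List.length_cons, List.length_nil] at hpre
        rw [hpre]
        congr 1
        omega
      have hgetk : order[k] = i := by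
        have := htake
        rw [List.take_add_one] at this
        have h2 : order[k]?.toList = [i] := by
          exact (List.append_cancel_left this)
        simp [List.getElem?_eq_getElem hk] at h2
        exact h2
      have hidx : order.idxOf i = k := by
        rw [← hgetk]
        exact hnd.idxOf_getElem k hk
      -- the new dict
      have hget' : ∀ j : Int, (seen.insert i (n - ((seen.size : Int) + 1))).get? j =
          if j ∈ order.take (k + 1) then some (n - 1 - (order.idxOf j : Int)) else none := by
        intro j
        rw [PySem.Dict.get?_insert, htake]
        by_cases hji : j = i
        · subst hji
          rw [if_pos rfl, if_pos (by simp)]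
          rw [hidx, hsize]
          congr 1
          ring
        · rw [if_neg hji, hget j]
          have : (j ∈ order.take k ++ [i]) ↔ j ∈ order.take k := by simp [hji]
          simp only [this]
      have hsize' : (seen.insert i (n - ((seen.size : Int) + 1))).size = k + 1 := by
        rw [PySem.Dict.size_insert, if_neg (by simp [hci]), hsize]
      rw [← htake] at hfold
      have := ih _ (res ++ [(seen.insert i (n - ((seen.size : Int) + 1))).getD i 0]) (k + 1)
        hnd hget' hsize' hfold
      simp only [hci, Bool.false_eq_true, if_false] at this ⊢
      rw [this, PySem.Dict.getD_eq_get?_getD, hget' i, if_pos (by rw [htake]; simp)]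
      simp [hidx]

-- B's closed form, via the fold: the distinct count of the prefix ending at i's first
-- occurrence is i's rank in the deduplicated list, plus one
lemma ofList_take_idx : ∀ (l : List Int) (s : PySem.Set Int) (i : Int), i ∉ s → i ∈ l →
    (List.foldl PySem.Set.add s (l.take (l.idxOf i + 1))).length
      = (List.foldl PySem.Set.add s l).idxOf i + 1 := by
  intro l
  induction l with
  | nil => intro s i _ h; cases h
  | cons x xs ih =>
    intro s i hs hl
    by_cases hxi : x = i
    · subst hxi
      have hidx0 : (x :: xs).idxOf x = 0 := by simp
      rw [hidx0]
      simp only [List.take_succ_cons, List.take_zero, List.foldl_cons, List.foldl_nil]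
      have hadd : PySem.Set.add s x = s ++ [x] := by
        unfold PySem.Set.add
        simp [PySem.Set.contains, hs]
      have hpre := prefix_foldl_add xs (PySem.Set.add s x)
      obtain ⟨t, ht⟩ := hpre
      rw [← ht, hadd]
      rw [List.idxOf_append_of_mem (by simp)]
      rw [List.idxOf_append_of_notMem hs]
      simp
    · have hxi' : i ≠ x := fun h => hxi h.symm
      have hl' : i ∈ xs := by
        cases hl with
        | head => exact absurd rfl hxi'
        | tail _ h => exact h
      have hidx : (x :: xs).idxOf i = xs.idxOf i + 1 := by
        rw [List.idxOf_cons_ne xs hxi]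
      rw [hidx]
      simp only [List.take_succ_cons, List.foldl_cons]
      exact ih (PySem.Set.add s x) i
        (by
          unfold PySem.Set.add
          split
          · exact hs
          · simpa [hxi'] using hs) hl'

-- ===== VERDICT (by name: the statement is the Claim_ definition above) =====
theorem order_clusters_spec : Claim_equal_order_clusters := by
  intro cluster _
  unfold Spec_order_clusters order_clusters order_clusters_alt
  set order := PySem.Set.ofList cluster with horder
  set n : Int := (order.length : Int) with hn
  have hnd : order.Nodup := PySem.Set.nodup_ofList cluster
  have hA := Aloop order n cluster PySem.Dict.empty [] 0 hnd
    (by intro i; simp [PySem.Dict.get?, PySem.Dict.empty])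
    (by simp [PySem.Dict.size, PySem.Dict.empty])
    (by exact (PySem.Set.ofList_eq_foldl cluster).symm)
  rw [hA]
  simp only [List.nil_append]
  apply List.map_congr_left
  intro i hi
  have hidx : (PySem.List.index? cluster i).getD 0 = cluster.idxOf i := by
    have hsome : (PySem.List.index? cluster i).isSome :=
      (PySem.List.index?_isSome_iff cluster i).mpr hi
    obtain ⟨k, hk⟩ := Option.isSome_iff_exists.mp hsome
    have h2 : cluster.idxOf? i = some k := by rw [← PySem.List.index?_eq_idxOf?, hk]
    rw [hk, List.idxOf_eq_getD_idxOf?, h2]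
    rfl
  rw [hidx]
  have hcast : ((cluster.idxOf i : Int) + 1) = ((cluster.idxOf i + 1 : Nat) : Int) := by push_cast; ring
  rw [hcast, PySem.List.slice_to_natCast]
  have hx := ofList_take_idx cluster [] i (by simp) hi
  have hof : PySem.Set.ofList (cluster.take (cluster.idxOf i + 1))
      = List.foldl PySem.Set.add [] (cluster.take (cluster.idxOf i + 1)) :=
    PySem.Set.ofList_eq_foldl _
  rw [hof, hx, ← PySem.Set.ofList_eq_foldl, ← horder]
  push_cast
  ring
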